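-- pv_equiv track=rewrite | github.com/xifu-irap/fpasim-fw | lib/common/common/test/tes_signalling_model.py | _compute_flags
-- ===== SOURCE A (Python) =====
-- def _compute_flags(data_list_p,length_p):
--     """
--     This method computes the sof, eof flags of the input list
--     Note:
--         . the element type of the input list doesn't matter.
--         . Example:
--             . if length_p = 1 then
--                 sof_list =  [1,1,1,1,....,1]
--                 eof_list = [1,1,1,1,.....,1]
--             . if length_p = 2 then
--                 sof_list = [1,0,1,0,.....,1,0]
--                 eof_list = [0,1,0,1,.....,0,1]
--     :param data_list_p: (list) input data list
--     :param length_p: (integer >= 1). Define the number of "samples" of a block/frame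
--     :return: a list of sof and a list of eof
--     """
--
--     sof_list = []
--     eof_list = []
--     cnt = 1
--     for data in data_list_p:
--         if cnt == 1:
--             sof_list.append(1)
--         else:
--             sof_list.append(0)
--         if cnt == length_p:
--             eof_list.append(1)
--         else:
--             eof_list.append(0)
--         if cnt == length_p:
--             cnt = 1
--         else:
--             cnt = cnt + 1
--     return sof_list,eof_list
-- ===== SOURCE B (Python) =====
-- def _compute_flags(data_list_p, length_p):
--     n = len(data_list_p)
--     sof_list = [1 if i % length_p == 0 else 0 for i in range(n)]
--     eof_list = [1 if i % length_p == length_p - 1 else 0 for i in range(n)]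
--     return sof_list, eof_list
-- ===== Notes on version B (the rewrite author's own statement) =====
-- stated objective: simpler
-- what changed: B drops A's maintained cyclic counter and its per-element state machine, computing each flag directly from the position index modulo length_p in two stateless comprehensions.
-- outside the precondition, e.g. on _compute_flags([1, 2, 3], 0): A returns ([1, 0, 0], [0, 0, 0]), B raises ZeroDivisionError; on _compute_flags([1, 2, 3], -1): A returns ([1, 0, 0], [0, 0, 0]), B returns ([1, 1, 1], [0, 0, 0])
import Mathlib
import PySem

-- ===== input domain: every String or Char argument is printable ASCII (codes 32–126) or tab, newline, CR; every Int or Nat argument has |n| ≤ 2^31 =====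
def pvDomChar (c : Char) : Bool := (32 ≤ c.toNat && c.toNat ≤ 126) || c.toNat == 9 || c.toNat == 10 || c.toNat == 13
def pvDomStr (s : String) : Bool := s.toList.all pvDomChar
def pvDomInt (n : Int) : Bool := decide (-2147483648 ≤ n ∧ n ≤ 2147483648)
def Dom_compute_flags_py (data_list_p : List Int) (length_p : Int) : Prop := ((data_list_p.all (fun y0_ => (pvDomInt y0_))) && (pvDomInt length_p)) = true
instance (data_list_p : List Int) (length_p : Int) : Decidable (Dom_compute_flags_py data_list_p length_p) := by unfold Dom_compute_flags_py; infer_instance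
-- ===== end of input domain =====

-- B replaces A's maintained cyclic counter (state machine) with stateless positional flags i % length_p; simpler, same O(n).
-- ===== PORT A =====
def compute_flags_py (data_list_p : List Int) (length_p : Int) : List Int × List Int :=
  let s := data_list_p.foldl
    (fun (st : List Int × List Int × Int) _ =>
      let sof := st.1 ++ [if st.2.2 = 1 then (1 : Int) else 0]
      let eof := st.2.1 ++ [if st.2.2 = length_p then (1 : Int) else 0]
      let cnt := if st.2.2 = length_p then 1 else st.2.2 + 1
      (sof, eof, cnt))
    ([], [], 1)
  (s.1, s.2.1)

-- ===== PORT B =====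
def compute_flags_py_alt (data_list_p : List Int) (length_p : Int) : List Int × List Int :=
  let n := data_list_p.length
  ((List.range n).map (fun (i : Nat) => if PySem.Int.mod (i : Int) length_p = 0 then (1 : Int) else 0),
   (List.range n).map (fun (i : Nat) => if PySem.Int.mod (i : Int) length_p = length_p - 1 then (1 : Int) else 0))

-- ===== PRECONDITION & SPEC =====
-- Pre_ restricts to the documented natural domain "length_p: (integer >= 1)": for length_p = 0
-- B raises ZeroDivisionError, and for negative length_p A's counter never cycles — values A
-- returns there are artefacts outside the function's stated domain.
def Pre_compute_flags_py (data_list_p : List Int) (length_p : Int) : Prop := 1 ≤ length_p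
instance (data_list_p : List Int) (length_p : Int) : Decidable (Pre_compute_flags_py data_list_p length_p) := by unfold Pre_compute_flags_py; infer_instance
def pvWitness_compute_flags_py : List Int × Int := ([7, 8, 9, 10, 11], 2)

def Spec_compute_flags_py (data_list_p : List Int) (length_p : Int) (out : List Int × List Int) : Prop := out = compute_flags_py_alt data_list_p length_p
instance (data_list_p : List Int) (length_p : Int) (out : List Int × List Int) : Decidable (Spec_compute_flags_py data_list_p length_p out) := by unfold Spec_compute_flags_py; infer_instance

-- ===== CLAIM (what is proved, stated in full; the proofs are below) =====
def Claim_equal_compute_flags_py : Prop := ∀ (data_list_p : List Int) (length_p : Int), Dom_compute_flags_py data_list_p length_p → Pre_compute_flags_py data_list_p length_p → Spec_compute_flags_py data_list_p length_p (compute_flags_py data_list_p length_p)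

-- ===== LEMMAS AND PROOFS =====

-- A's loop body, named for the invariant proof
def stepA (length_p : Int) (st : List Int × List Int × Int) (_ : Int) : List Int × List Int × Int :=
  (st.1 ++ [if st.2.2 = 1 then (1 : Int) else 0],
   st.2.1 ++ [if st.2.2 = length_p then (1 : Int) else 0],
   if st.2.2 = length_p then 1 else st.2.2 + 1)

lemma compute_flags_py_eq (l : List Int) (len : Int) :
    compute_flags_py l len =
      ((l.foldl (stepA len) ([], [], 1)).1, (l.foldl (stepA len) ([], [], 1)).2.1) := rfl

-- loop invariant: after processing, with counter (k % len) + 1, the flags appended are the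
-- positional ones for indices k, k+1, …
lemma loop_inv (len : Int) (hlen : 1 ≤ len) :
    ∀ (l : List Int) (k : Nat) (sof eof : List Int),
      l.foldl (stepA len) (sof, eof, (k : Int) % len + 1) =
        (sof ++ (List.range l.length).map (fun j => if ((k + j : Nat) : Int) % len = 0 then (1 : Int) else 0),
         eof ++ (List.range l.length).map (fun j => if ((k + j : Nat) : Int) % len = len - 1 then (1 : Int) else 0),
         ((k + l.length : Nat) : Int) % len + 1) := by
  intro l
  induction l with
  | nil => intro k sof eof; simp
  | cons x t ih =>
      intro k sof eof
      have h0 : (0 : Int) ≤ (k : Int) % len := Int.emod_nonneg _ (by omega)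
      have h1 : (k : Int) % len < len := Int.emod_lt_of_pos _ (by omega)
      have key : ((k : Int) % len + 1) % len = ((k : Int) + 1) % len :=
        Int.emod_add_emod _ _ _
      have hcnt : (if (k : Int) % len + 1 = len then (1 : Int) else (k : Int) % len + 1 + 1)
          = (((k + 1 : Nat)) : Int) % len + 1 := by
        push_cast
        by_cases h : (k : Int) % len + 1 = len
        · rw [if_pos h, ← key, h, Int.emod_self]; omega
        · have h2 : ((k : Int) % len + 1) % len = (k : Int) % len + 1 :=
            Int.emod_eq_of_lt (by omega) (by omega)
          rw [if_neg h, ← key, h2]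
      have hsof : (if (k : Int) % len + 1 = 1 then (1 : Int) else 0)
          = (if ((k + 0 : Nat) : Int) % len = 0 then (1 : Int) else 0) := by
        simp only [Nat.add_zero]
        split_ifs with h h' <;> omega
      have heof : (if (k : Int) % len + 1 = len then (1 : Int) else 0)
          = (if ((k + 0 : Nat) : Int) % len = len - 1 then (1 : Int) else 0) := by
        simp only [Nat.add_zero]
        split_ifs with h h' <;> omega
      show List.foldl (stepA len) (stepA len (sof, eof, (k : Int) % len + 1) x) t = _
      rw [show stepA len (sof, eof, (k : Int) % len + 1) x
            = (sof ++ [if ((k + 0 : Nat) : Int) % len = 0 then (1 : Int) else 0],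
               eof ++ [if ((k + 0 : Nat) : Int) % len = len - 1 then (1 : Int) else 0],
               ((k + 1 : Nat) : Int) % len + 1) from by
            simp only [stepA]; rw [← hcnt, ← hsof, ← heof]]
      rw [ih (k + 1)]
      refine Prod.ext ?_ (Prod.ext ?_ ?_) <;> simp [List.range_succ_eq_map, List.map_map,
        Function.comp, Nat.add_comm, Nat.add_left_comm]

theorem compute_flags_py_spec : Claim_equal_compute_flags_py := by
  intro l len _ hpre
  unfold Spec_compute_flags_py
  have hlen : 1 ≤ len := hpre
  rw [compute_flags_py_eq, show ((([] : List Int), ([] : List Int), (1 : Int)))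
        = (([] : List Int), ([] : List Int), ((0 : Nat) : Int) % len + 1) from by simp,
      loop_inv len hlen l 0 [] []]
  simp only [compute_flags_py_alt, List.nil_append]
  refine Prod.ext ?_ ?_ <;>
  · apply List.map_congr_left
    intro i hi
    rw [PySem.Int.mod_eq_emod_of_pos (by omega)]
    simp
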